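-- pv_equiv track=rewrite | github.com/aadjones/pawn_blockers | modules/data/sources/twic.py | _split_pgn_content
-- ===== SOURCE A (Python) =====
-- from typing import Iterator, List, Optional
--
-- def _split_pgn_content(content: str) -> List[str]:
--     """Split PGN content into individual games."""
--     games = []
--     current_game = []
--
--     for line in content.splitlines():
--         line = line.strip()
--
--         # Start of new game (Event header)
--         if line.startswith("[Event "):
--             if current_game:
--                 games.append("\n".join(current_game))
--             current_game = [line]
--         elif current_game:
--             current_game.append(line)
--
--     # Don't forget the last game
--     if current_game:
--         games.append("\n".join(current_game))
--
--     return games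
-- ===== SOURCE B (Python) =====
-- def _split_pgn_content(content: str):
--     """Split PGN content into individual games."""
--     stripped = [line.strip() for line in content.splitlines()]
--     starts = [i for i, line in enumerate(stripped) if line.startswith("[Event ")]
--     bounds = starts + [len(stripped)]
--     return ["\n".join(stripped[a:b]) for a, b in zip(bounds, bounds[1:])]
-- ===== Notes on version B (the rewrite author's own statement) =====
-- stated objective: alternative
-- what changed: Replaces the stateful accumulator loop (current_game list plus flush-on-boundary and final flush) by an index-based decomposition: materialize the stripped lines once, collect the indices of Event-header boundary lines, then slice-and-join between consecutive boundaries.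
import Mathlib
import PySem

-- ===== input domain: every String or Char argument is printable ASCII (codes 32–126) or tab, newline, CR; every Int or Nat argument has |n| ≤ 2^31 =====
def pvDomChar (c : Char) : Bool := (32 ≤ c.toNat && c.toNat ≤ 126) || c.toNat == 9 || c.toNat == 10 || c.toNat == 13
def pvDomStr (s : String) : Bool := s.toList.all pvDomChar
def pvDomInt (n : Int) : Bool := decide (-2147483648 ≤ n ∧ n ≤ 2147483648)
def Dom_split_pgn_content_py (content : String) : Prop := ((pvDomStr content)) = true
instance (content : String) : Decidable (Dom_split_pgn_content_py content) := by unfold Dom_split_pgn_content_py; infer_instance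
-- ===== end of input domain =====

-- B splits by boundary indices and slicing instead of A's stateful accumulator loop; same cost, different decomposition.

-- ===== PORT A =====
def split_pgn_content_py (content : String) : List String :=
  let r := (PySem.Str.splitlines content).foldl
    (fun (st : List String × List String) (line : String) =>
      let line := PySem.Str.strip line
      if PySem.Str.startswith line "[Event " then
        (if st.2 ≠ [] then st.1 ++ [PySem.Str.join "\n" st.2] else st.1, [line])
      else if st.2 ≠ [] then (st.1, st.2 ++ [line]) else st)
    ([], [])
  if r.2 ≠ [] then r.1 ++ [PySem.Str.join "\n" r.2] else r.1

-- ===== PORT B =====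
def split_pgn_content_py_alt (content : String) : List String :=
  let stripped := (PySem.Str.splitlines content).map PySem.Str.strip
  let starts := ((PySem.List.enumerate stripped).filter
      (fun p => PySem.Str.startswith p.2 "[Event ")).map Prod.fst
  let bounds := starts ++ [(stripped.length : Int)]
  (bounds.zip bounds.tail).map
    (fun p => PySem.Str.join "\n" (PySem.List.slice stripped (some p.1) (some p.2)))

-- ===== PRECONDITION & SPEC =====
def Spec_split_pgn_content_py (content : String) (out : List String) : Prop := out = split_pgn_content_py_alt content
instance (content : String) (out : List String) : Decidable (Spec_split_pgn_content_py content out) := by unfold Spec_split_pgn_content_py; infer_instance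

-- ===== CLAIM (what is proved, stated in full; the proofs are below) =====
def Claim_equal_split_pgn_content_py : Prop := ∀ (content : String), Dom_split_pgn_content_py content → Spec_split_pgn_content_py content (split_pgn_content_py content)

-- ===== LEMMAS AND PROOFS =====

def pvIsEv (l : String) : Bool := PySem.Str.startswith l "[Event "

-- canonical chunk decomposition of the stripped line list
def pvChunks : List String → List (List String)
  | [] => []
  | l :: ls =>
    if pvIsEv l then
      (l :: ls.takeWhile (fun x => !pvIsEv x)) :: pvChunks (ls.dropWhile (fun x => !pvIsEv x))
    else pvChunks ls
termination_by ls => ls.length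
decreasing_by
  · have := List.length_dropWhile_le (fun x => !pvIsEv x) ls; simp; omega
  · simp

-- A's loop step on an already-stripped line
def pvStep (st : List String × List String) (l : String) : List String × List String :=
  if pvIsEv l then
    (if st.2 ≠ [] then st.1 ++ [PySem.Str.join "\n" st.2] else st.1, [l])
  else if st.2 ≠ [] then (st.1, st.2 ++ [l]) else st

def pvFinish (r : List String × List String) : List String :=
  if r.2 ≠ [] then r.1 ++ [PySem.Str.join "\n" r.2] else r.1

theorem pvA_main (ls : List String) : ∀ (g cur : List String), cur ≠ [] →
    pvFinish (ls.foldl pvStep (g, cur)) =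
      g ++ (PySem.Str.join "\n" (cur ++ ls.takeWhile (fun x => !pvIsEv x)) ::
            (pvChunks (ls.dropWhile (fun x => !pvIsEv x))).map (PySem.Str.join "\n")) := by
  induction ls with
  | nil => intro g cur h; simp [pvFinish, h, pvChunks]
  | cons l ls ih =>
    intro g cur h
    by_cases hl : pvIsEv l = true
    · have hstep : pvStep (g, cur) l = (g ++ [PySem.Str.join "\n" cur], [l]) := by
        simp [pvStep, hl, h]
      rw [List.foldl_cons, hstep, ih _ [l] (by simp)]
      simp [hl, pvChunks]
    · have hstep : pvStep (g, cur) l = (g, cur ++ [l]) := by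
        simp [pvStep, hl, h]
      rw [List.foldl_cons, hstep, ih _ (cur ++ [l]) (by simp)]
      simp [hl]

theorem pvA_top (ls : List String) :
    pvFinish (ls.foldl pvStep ([], [])) = (pvChunks ls).map (PySem.Str.join "\n") := by
  induction ls with
  | nil => simp [pvFinish, pvChunks]
  | cons l ls ih =>
    by_cases hl : pvIsEv l = true
    · have hstep : pvStep ([], []) l = ([], [l]) := by simp [pvStep, hl]
      rw [List.foldl_cons, hstep, pvA_main ls [] [l] (by simp)]
      simp [pvChunks, hl]
    · have hstep : pvStep (([] : List String), ([] : List String)) l = ([], []) := by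
        simp [pvStep, hl]
      rw [List.foldl_cons, hstep, ih]
      simp [pvChunks, hl]

-- B side: natural-number boundary indices
def pvStarts : List String → Nat → List Nat
  | [], _ => []
  | l :: ls, s => if pvIsEv l then s :: pvStarts ls (s + 1) else pvStarts ls (s + 1)

theorem pvStarts_shift (ls : List String) : ∀ s, pvStarts ls (s + 1) = (pvStarts ls s).map (· + 1) := by
  induction ls with
  | nil => intro s; simp [pvStarts]
  | cons l ls ih =>
    intro s
    by_cases hl : pvIsEv l = true <;> simp [pvStarts, hl, ih (s + 1), ih s]

theorem pvStarts_cast (ls : List String) : ∀ s : Nat,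
    ((PySem.List.enumerate ls ((s : Nat) : Int)).filter
        (fun p => PySem.Str.startswith p.2 "[Event ")).map Prod.fst
      = (pvStarts ls s).map (fun n : Nat => (n : Int)) := by
  induction ls with
  | nil => intro s; simp [PySem.List.enumerate_nil, pvStarts]
  | cons l ls ih =>
    intro s
    have hsucc : ((s : Int) + 1) = (((s + 1 : Nat)) : Int) := by push_cast; ring
    rw [PySem.List.enumerate_cons, List.filter_cons, hsucc]
    by_cases hl : pvIsEv l = true
    · have hc : PySem.Str.startswith ((s : Int), l).2 "[Event " = true := hl
      rw [if_pos hc, List.map_cons, ih (s + 1)]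
      have hp : pvStarts (l :: ls) s = s :: pvStarts ls (s + 1) := by
        simp only [pvStarts]; rw [if_pos hl]
      rw [hp, List.map_cons]
    · have hc : ¬ PySem.Str.startswith ((s : Int), l).2 "[Event " = true := hl
      rw [if_neg hc, ih (s + 1)]
      have hp : pvStarts (l :: ls) s = pvStarts ls (s + 1) := by
        simp only [pvStarts]; rw [if_neg hl]
      rw [hp]

theorem pvStarts_cast0 (ls : List String) :
    ((PySem.List.enumerate ls).filter (fun p => PySem.Str.startswith p.2 "[Event ")).map Prod.fst
      = (pvStarts ls 0).map (fun n : Nat => (n : Int)) := by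
  have h := pvStarts_cast ls 0
  simpa using h

-- the games produced from nat bounds
def pvGames (ls : List String) (bs : List Nat) : List String :=
  (bs.zip bs.tail).map (fun p => PySem.Str.join "\n" ((ls.drop p.1).take (p.2 - p.1)))

theorem pvGames_shift (l : String) (ls : List String) (bs : List Nat) :
    pvGames (l :: ls) (bs.map (· + 1)) = pvGames ls bs := by
  unfold pvGames
  rw [← List.map_tail, List.zip_map, List.map_map]
  apply List.map_congr_left
  intro p _
  simp [Prod.map]

theorem pvHead_take (ls : List String) :
    ls.take ((pvStarts ls 0 ++ [ls.length]).headD 0) = ls.takeWhile (fun x => !pvIsEv x) := by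
  induction ls with
  | nil => simp
  | cons l ls ih =>
    by_cases hl : pvIsEv l = true
    · simp [pvStarts, hl]
    · rw [List.takeWhile_cons]
      simp only [pvStarts, hl]
      rw [show (1 : Nat) = 0 + 1 from rfl, pvStarts_shift]
      rcases hps : pvStarts ls 0 with _ | ⟨a, as⟩
      · rw [hps] at ih
        simp only [List.map_nil, List.headD, List.length_cons]
        simp [List.take_succ_cons, ← ih]
      · rw [hps] at ih
        simp only [List.map_cons, List.headD]
        simp [List.take_succ_cons, ← ih]

theorem pvChunks_dropWhile (ls : List String) :
    pvChunks ls = pvChunks (ls.dropWhile (fun x => !pvIsEv x)) := by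
  induction ls with
  | nil => simp [pvChunks]
  | cons l ls ih =>
    by_cases hl : pvIsEv l = true
    · simp [hl]
    · rw [List.dropWhile_cons]
      simp only [hl, Bool.not_false, if_true, ← ih]
      simp [pvChunks, hl]

theorem pvB_main (ls : List String) :
    pvGames ls (pvStarts ls 0 ++ [ls.length]) = (pvChunks ls).map (PySem.Str.join "\n") := by
  induction ls with
  | nil => simp [pvGames, pvStarts, pvChunks]
  | cons l ls ih =>
    by_cases hl : pvIsEv l = true
    · have hb : pvStarts (l :: ls) 0 ++ [(l :: ls).length]
          = 0 :: ((pvStarts ls 0 ++ [ls.length]).map (· + 1)) := by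
        simp only [pvStarts, hl, if_true, List.length_cons]
        rw [show (1 : Nat) = 0 + 1 from rfl, pvStarts_shift]
        simp
      rw [hb]
      have hz : pvGames (l :: ls) (0 :: ((pvStarts ls 0 ++ [ls.length]).map (· + 1)))
          = PySem.Str.join "\n"
              ((l :: ls).take ((((pvStarts ls 0 ++ [ls.length]).map (· + 1))).headD 0))
              :: pvGames (l :: ls) ((pvStarts ls 0 ++ [ls.length]).map (· + 1)) := by
        rcases hm : (pvStarts ls 0 ++ [ls.length]).map (· + 1) with _ | ⟨b, bs⟩
        · simp at hm
        · simp [pvGames, List.zip_cons_cons]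
      rw [hz, pvGames_shift]
      have hhead : (((pvStarts ls 0 ++ [ls.length]).map (· + 1)).headD 0)
          = (pvStarts ls 0 ++ [ls.length]).headD 0 + 1 := by
        cases pvStarts ls 0 <;> simp
      rw [hhead, List.take_succ_cons, pvHead_take, ih]
      have hc : pvChunks (l :: ls)
          = (l :: ls.takeWhile (fun x => !pvIsEv x))
              :: pvChunks (ls.dropWhile (fun x => !pvIsEv x)) := by
        simp [pvChunks, hl]
      rw [hc, ← pvChunks_dropWhile]
      simp
    · have hb : pvStarts (l :: ls) 0 ++ [(l :: ls).length]
          = (pvStarts ls 0 ++ [ls.length]).map (· + 1) := by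
        simp only [pvStarts, hl, List.length_cons]
        rw [show (1 : Nat) = 0 + 1 from rfl, pvStarts_shift]
        simp
      rw [hb, pvGames_shift, ih]
      have hc : pvChunks (l :: ls) = pvChunks ls := by simp [pvChunks, hl]
      rw [hc]

theorem pvZipCast (ls : List String) (bs : List Nat) :
    ((bs.map (fun n : Nat => (n : Int))).zip ((bs.map (fun n : Nat => (n : Int))).tail)).map
      (fun p => PySem.Str.join "\n" (PySem.List.slice ls (some p.1) (some p.2)))
      = pvGames ls bs := by
  unfold pvGames
  rw [← List.map_tail, List.zip_map, List.map_map]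
  apply List.map_congr_left
  intro p _
  simp [Prod.map, PySem.List.slice_natCast]

-- ===== VERDICT (by name: the statement is the Claim_ definition above) =====
theorem split_pgn_content_py_spec : Claim_equal_split_pgn_content_py := by
  intro content _
  unfold Spec_split_pgn_content_py
  have hA : split_pgn_content_py content
      = pvFinish (((PySem.Str.splitlines content).map PySem.Str.strip).foldl pvStep ([], [])) := by
    unfold split_pgn_content_py pvFinish pvStep pvIsEv
    rw [List.foldl_map]
  have hB : split_pgn_content_py_alt content
      = pvGames ((PySem.Str.splitlines content).map PySem.Str.strip)
          (pvStarts ((PySem.Str.splitlines content).map PySem.Str.strip) 0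
            ++ [((PySem.Str.splitlines content).map PySem.Str.strip).length]) := by
    unfold split_pgn_content_py_alt
    dsimp only
    rw [pvStarts_cast0]
    rw [show ((pvStarts ((PySem.Str.splitlines content).map PySem.Str.strip) 0).map (fun n : Nat => (n : Int))
          ++ [(((PySem.Str.splitlines content).map PySem.Str.strip).length : Int)])
        = ((pvStarts ((PySem.Str.splitlines content).map PySem.Str.strip) 0
            ++ [((PySem.Str.splitlines content).map PySem.Str.strip).length]).map (fun n : Nat => (n : Int)))
        from by simp]
    exact pvZipCast _ _
  rw [hA, hB, pvA_top, pvB_main]
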